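-- pv_equiv track=rewrite | github.com/prmcadam/kvarq-tools | parse_kvarq_output.py | resistanceLoci
-- ===== SOURCE A (Python) =====
-- import collections
--
-- def resistanceLoci(res):
-- 	snp_in_locus={"inhA":0,"katG":0,"rpoB":0,"rpoA":0,"rpoC":0,"gyrA":0,"gyrB":0,"rpsL":0,"rrs":0,"embB":0,}
-- 	if res==[]:
-- 		return snp_in_locus
-- 	else:
-- 		for locus in snp_in_locus:
-- 			if locus in res:
-- 				snp_in_locus[locus]=1
-- 	od = collections.OrderedDict(sorted(snp_in_locus.items()))
-- 	return od
-- ===== SOURCE B (Python) =====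
-- import collections
--
-- LOCI = ["inhA", "katG", "rpoB", "rpoA", "rpoC", "gyrA", "gyrB", "rpsL", "rrs", "embB"]
--
-- def resistanceLoci(res):
-- 	if res == []:
-- 		return {locus: 0 for locus in LOCI}
-- 	hits = set()
-- 	for x in res:
-- 		if x in LOCI:
-- 			hits.add(x)
-- 	return collections.OrderedDict((locus, 1 if locus in hits else 0) for locus in sorted(LOCI))
-- ===== Notes on version B (the rewrite author's own statement) =====
-- stated objective: idiomatic
-- what changed: B scans the input list once, collecting known loci into a hit set, and then builds the sorted mapping from the fixed key list, instead of A's loop that tests each of the 10 fixed keys against the whole input list.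
import Mathlib
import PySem

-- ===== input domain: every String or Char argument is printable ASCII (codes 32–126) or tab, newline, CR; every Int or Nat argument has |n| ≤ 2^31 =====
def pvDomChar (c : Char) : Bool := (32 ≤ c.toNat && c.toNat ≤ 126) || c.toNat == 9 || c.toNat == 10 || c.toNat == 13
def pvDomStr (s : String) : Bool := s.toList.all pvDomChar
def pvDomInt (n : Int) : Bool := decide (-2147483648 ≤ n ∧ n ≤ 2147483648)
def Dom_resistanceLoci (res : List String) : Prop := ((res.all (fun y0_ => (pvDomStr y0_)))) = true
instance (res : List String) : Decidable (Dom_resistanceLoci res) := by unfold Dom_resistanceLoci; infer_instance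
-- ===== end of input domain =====

-- B marks hits in one pass over the input list instead of testing each of the 10 fixed
-- locus keys against the whole list (objective: idiomatic; no speed claim).

-- ===== PORT A =====
-- the initial dict literal {"inhA":0, ..., "embB":0} in insertion order
def pvSnpInLocus0 : PySem.Dict String Int :=
  PySem.Dict.mk [("inhA",0),("katG",0),("rpoB",0),("rpoA",0),("rpoC",0),("gyrA",0),("gyrB",0),("rpsL",0),("rrs",0),("embB",0)]

def resistanceLoci (res : List String) : List (String × Int) :=
  let snp_in_locus := pvSnpInLocus0
  if res == [] then
    PySem.Dict.items snp_in_locus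
  else
    -- for locus in snp_in_locus: if locus in res: snp_in_locus[locus] = 1
    let snp_in_locus :=
      (PySem.Dict.keys snp_in_locus).foldl
        (fun d locus => if res.contains locus then PySem.Dict.insert d locus 1 else d)
        snp_in_locus
    -- od = collections.OrderedDict(sorted(snp_in_locus.items())); return od
    PySem.List.sorted2 (PySem.Dict.items snp_in_locus) Prod.fst Prod.snd

-- ===== PORT B =====
def pvLOCI : List String :=
  ["inhA","katG","rpoB","rpoA","rpoC","gyrA","gyrB","rpsL","rrs","embB"]

def resistanceLoci_alt (res : List String) : List (String × Int) :=
  if res == [] then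
    pvLOCI.map (fun locus => (locus, 0))
  else
    let hits : PySem.Set String :=
      res.foldl (fun s x => if pvLOCI.contains x then PySem.Set.add s x else s) PySem.Set.empty
    (PySem.List.sorted pvLOCI (fun k => k) false).map
      (fun locus => (locus, if PySem.Set.contains hits locus then (1 : Int) else 0))

-- ===== PRECONDITION & SPEC =====
def Spec_resistanceLoci (res : List String) (out : List (String × Int)) : Prop := out = resistanceLoci_alt res
instance (res : List String) (out : List (String × Int)) : Decidable (Spec_resistanceLoci res out) := by unfold Spec_resistanceLoci; infer_instance

-- ===== CLAIM (what is proved, stated in full; the proofs are below) =====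
def Claim_equal_resistanceLoci : Prop := ∀ (res : List String), Dom_resistanceLoci res → Spec_resistanceLoci res (resistanceLoci res)

-- ===== LEMMAS AND PROOFS =====

-- B's hit set: membership in the fold
theorem mem_hits_fold (res : List String) (s : PySem.Set String) (k : String) :
    (k ∈ res.foldl (fun s x => if pvLOCI.contains x then PySem.Set.add s x else s) s) ↔
      (k ∈ s ∨ (k ∈ res ∧ k ∈ pvLOCI)) := by
  induction res generalizing s with
  | nil => simp
  | cons y ys ih =>
    rw [List.foldl_cons]
    by_cases hy : pvLOCI.contains y = true
    · rw [if_pos hy, ih, PySem.Set.mem_add]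
      have hy' : y ∈ pvLOCI := by simpa using hy
      constructor
      · rintro ((h | rfl) | ⟨h1, h2⟩)
        · exact Or.inl h
        · exact Or.inr ⟨List.mem_cons_self .., hy'⟩
        · exact Or.inr ⟨List.mem_cons_of_mem _ h1, h2⟩
      · rintro (h | ⟨h1, h2⟩)
        · exact Or.inl (Or.inl h)
        · rcases List.mem_cons.mp h1 with rfl | h1
          · exact Or.inl (Or.inr rfl)
          · exact Or.inr ⟨h1, h2⟩
    · rw [if_neg hy, ih]
      have hy' : y ∉ pvLOCI := by simpa using hy
      constructor
      · rintro (h | ⟨h1, h2⟩)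
        · exact Or.inl h
        · exact Or.inr ⟨List.mem_cons_of_mem _ h1, h2⟩
      · rintro (h | ⟨h1, h2⟩)
        · exact Or.inl h
        · rcases List.mem_cons.mp h1 with rfl | h1
          · exact absurd h2 hy'
          · exact Or.inr ⟨h1, h2⟩

theorem hits_contains (res : List String) (k : String) (hk : k ∈ pvLOCI) :
    PySem.Set.contains
        (res.foldl (fun s x => if pvLOCI.contains x then PySem.Set.add s x else s) PySem.Set.empty) k
      = res.contains k := by
  have h : (k ∈ res.foldl (fun s x => if pvLOCI.contains x then PySem.Set.add s x else s) PySem.Set.empty) ↔ k ∈ res := by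
    rw [mem_hits_fold]
    constructor
    · rintro (h | ⟨h1, _⟩)
      · simp [PySem.Set.empty] at h
      · exact h1
    · exact fun h => Or.inr ⟨h, hk⟩
  have e1 : List.contains (res.foldl (fun s x => if pvLOCI.contains x then PySem.Set.add s x else s) PySem.Set.empty) k
      = decide (k ∈ res.foldl (fun s x => if pvLOCI.contains x then PySem.Set.add s x else s) PySem.Set.empty) :=
    List.contains_eq_mem _ _
  have e2 : res.contains k = decide (k ∈ res) := List.contains_eq_mem _ _
  show List.contains _ k = res.contains k
  rw [e1, e2]
  exact decide_eq_decide.mpr h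

-- A's marking loop: keys are unchanged
theorem keys_mark_fold (res : List String) (ks : List String) (d : PySem.Dict String Int)
    (hks : ∀ k ∈ ks, d.contains k = true) :
    (ks.foldl (fun d locus => if res.contains locus then PySem.Dict.insert d locus 1 else d) d).keys = d.keys := by
  induction ks generalizing d with
  | nil => rfl
  | cons y ys ih =>
    rw [List.foldl_cons]
    by_cases hc : res.contains y = true
    · rw [if_pos hc]
      rw [ih (d.insert y 1) (fun k hk => by
        rw [PySem.Dict.contains_insert]
        simp [hks k (List.mem_cons_of_mem _ hk)])]
      exact PySem.Dict.keys_insert_of_contains _ _ (hks y (List.mem_cons_self ..))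
    · rw [if_neg hc]
      exact ih d (fun k hk => hks k (List.mem_cons_of_mem _ hk))

-- A's marking loop: the value at each key
theorem getD_mark_fold (res : List String) (ks : List String) (d : PySem.Dict String Int)
    (hnd : ks.Nodup) (k : String) :
    (ks.foldl (fun d locus => if res.contains locus then PySem.Dict.insert d locus 1 else d) d).getD k 0
      = if k ∈ ks ∧ res.contains k = true then 1 else d.getD k 0 := by
  induction ks generalizing d with
  | nil => simp
  | cons y ys ih =>
    rw [List.foldl_cons]
    have hnd' : ys.Nodup := hnd.of_cons
    have hyny : y ∉ ys := (List.nodup_cons.mp hnd).1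
    by_cases hky : k = y
    · subst hky
      have hknys : k ∉ ys := hyny
      by_cases hc : res.contains k = true
      · have hc' : k ∈ res := by simpa using hc
        rw [if_pos hc, ih _ hnd']
        simp [hknys, hc', PySem.Dict.getD_insert_self]
      · have hc' : k ∉ res := by simpa using hc
        rw [if_neg hc, ih _ hnd']
        simp [hknys, hc']
    · by_cases hc : res.contains y = true
      · rw [if_pos hc, ih _ hnd']
        rw [PySem.Dict.getD_insert_of_ne _ _ _ hky]
        simp [List.mem_cons, hky]
      · rw [if_neg hc, ih _ hnd']
        simp [List.mem_cons, hky]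

-- inserting a pair into a mapped list, when the comparison agrees pointwise
theorem insertBy_map (f : String → String × Int) (lt1 : String → String → Bool)
    (lt2 : String × Int → String × Int → Bool) (x : String) (M : List String)
    (h : ∀ y ∈ M, lt2 (f x) (f y) = lt1 x y) :
    PySem.List.insertBy lt2 (f x) (M.map f) = (PySem.List.insertBy lt1 x M).map f := by
  induction M with
  | nil => rfl
  | cons y ys ih =>
    simp only [List.map_cons, PySem.List.insertBy]
    rw [h y (List.mem_cons_self ..)]
    by_cases hb : lt1 x y = true
    · rw [if_pos hb, if_pos hb]; rfl
    · rw [if_neg hb, if_neg hb, List.map_cons,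
        ih (fun z hz => h z (List.mem_cons_of_mem _ hz))]

-- the pair comparison used by sorted2 agrees with the string comparison on distinct keys
theorem lt2_eq_lt1 (w : String → Int) (x y : String) (hxy : x ≠ y) :
    (decide ((x, w x).1 < (y, w y).1) || !decide ((y, w y).1 < (x, w x).1) && decide ((x, w x).2 < (y, w y).2))
      = decide (x < y) := by
  rcases lt_trichotomy x y with h | h | h
  · simp [h, not_lt_of_gt h]
  · exact absurd h hxy
  · simp [h, not_lt_of_gt h]

-- sorting pairs with distinct first components = sorting the keys and re-attaching values
theorem foldl_insertBy_map (w : String → Int) (L M : List String) (h : (L ++ M).Nodup) :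
    L.foldl (fun acc x => PySem.List.insertBy
        (fun a b => decide (a.1 < b.1) || !decide (b.1 < a.1) && decide (a.2 < b.2)) (x, w x) acc)
      (M.map (fun k => (k, w k)))
    = (L.foldl (fun acc x => PySem.List.insertBy (fun a b => decide (a < b)) x acc) M).map
        (fun k => (k, w k)) := by
  induction L generalizing M with
  | nil => rfl
  | cons x L ih =>
    have hx : (x :: (L ++ M)).Nodup := h
    have hxnm : x ∉ L ++ M := (List.nodup_cons.mp hx).1
    rw [List.foldl_cons, List.foldl_cons]
    rw [insertBy_map (fun k => (k, w k)) (fun a b => decide (a < b)) _ x M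
      (fun y hy => lt2_eq_lt1 w x y (by
        intro hxy; subst hxy
        exact hxnm (List.mem_append.mpr (Or.inr hy))))]
    apply ih
    have hperm : (PySem.List.insertBy (fun a b => decide (a < b)) x M).Perm (x :: M) :=
      PySem.List.insertBy_perm _ _ _
    have hLM : (L ++ x :: M).Nodup := (List.perm_middle.nodup_iff).mpr hx
    exact ((hperm.append_left L).nodup_iff).mpr hLM

theorem sorted2_map_pairs (w : String → Int) (L : List String) (h : L.Nodup) :
    PySem.List.sorted2 (L.map (fun k => (k, w k))) Prod.fst Prod.snd
      = (PySem.List.sorted L (fun k => k) false).map (fun k => (k, w k)) := by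
  show (L.map (fun k => (k, w k))).foldl _ [] = _
  rw [List.foldl_map, PySem.List.sorted_eq_foldl_insertBy]
  exact foldl_insertBy_map w L [] (by simpa using h)

theorem pvLOCI_nodup : pvLOCI.Nodup := by decide

theorem pvSnpInLocus0_keys : pvSnpInLocus0.keys = pvLOCI := by decide

theorem pvSnpInLocus0_getD (k : String) (hk : k ∈ pvLOCI) : pvSnpInLocus0.getD k 0 = 0 := by
  simp only [pvLOCI, List.mem_cons] at hk
  rcases hk with rfl | rfl | rfl | rfl | rfl | rfl | rfl | rfl | rfl | rfl | h
  all_goals first | decide | cases h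

-- ===== VERDICT (by name: the statement is the Claim_ definition above) =====
theorem resistanceLoci_spec : Claim_equal_resistanceLoci := by
  intro res _
  unfold Spec_resistanceLoci
  show resistanceLoci res = resistanceLoci_alt res
  by_cases he : (res == []) = true
  · simp only [resistanceLoci, resistanceLoci_alt, if_pos he]
    decide
  · simp only [resistanceLoci, resistanceLoci_alt, if_neg he]
    -- A's side: items of the marked dict
    set F := (PySem.Dict.keys pvSnpInLocus0).foldl
      (fun d locus => if res.contains locus then PySem.Dict.insert d locus 1 else d)
      pvSnpInLocus0 with hF
    have hcont : ∀ k ∈ pvLOCI, pvSnpInLocus0.contains k = true := by decide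
    have hkeys : F.keys = pvLOCI := by
      rw [hF, pvSnpInLocus0_keys, keys_mark_fold res pvLOCI pvSnpInLocus0 hcont, pvSnpInLocus0_keys]
    have hitems : F.items = pvLOCI.map (fun k => (k, if res.contains k = true then (1:Int) else 0)) := by
      rw [PySem.Dict.items_eq_map_keys F (by rw [hkeys]; exact pvLOCI_nodup) 0, hkeys]
      apply List.map_congr_left
      intro k hk
      rw [hF, pvSnpInLocus0_keys, getD_mark_fold res pvLOCI pvSnpInLocus0 pvLOCI_nodup k]
      simp [hk, pvSnpInLocus0_getD k hk]
    rw [hitems]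
    -- B's side: replace the hit-set lookup by list membership
    have hB : (PySem.List.sorted pvLOCI (fun k => k) false).map
        (fun locus => (locus, if PySem.Set.contains
            (res.foldl (fun s x => if pvLOCI.contains x then PySem.Set.add s x else s) PySem.Set.empty) locus
          then (1:Int) else 0))
        = (PySem.List.sorted pvLOCI (fun k => k) false).map
            (fun k => (k, if res.contains k = true then (1:Int) else 0)) := by
      apply List.map_congr_left
      intro k hk
      rw [hits_contains res k ((PySem.List.mem_sorted _ _ _ _).mp hk)]
    rw [hB]
    exact sorted2_map_pairs _ pvLOCI pvLOCI_nodup
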